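-- pv_equiv track=rewrite | github.com/ElementsOfJustice/Automation | AI Assisted Audio Splicing/vosk-pyachocorasick_v3.py | get_word_at_nth_char
-- ===== SOURCE A (Python) =====
-- import string
--
-- def get_word_at_nth_char(string, n, offset=0):
--     words = string.split()
--     start = 0
--     for i, word in enumerate(words):
--         end = start + len(word)
--         if n <= end:
--             return words[min(i + offset, len(words) - 1)]
--         start = end + 1
--     return None
--
-- i = 0
-- ===== SOURCE B (Python) =====
-- from bisect import bisect_left
--
-- def get_word_at_nth_char(string, n, offset=0):
--     words = string.split()
--     ends = []
--     acc = 0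
--     for w in words:
--         acc += len(w) + 1
--         ends.append(acc - 1)
--     idx = bisect_left(ends, n)
--     if idx == len(words):
--         return None
--     return words[min(idx + offset, len(words) - 1)]
-- ===== Notes on version B (the rewrite author's own statement) =====
-- stated objective: alternative
-- what changed: A's linear scan that accumulates word start positions is replaced by building a prefix table of cumulative word end positions in one pass and locating the containing word with bisect.bisect_left (binary search).
import Mathlib
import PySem

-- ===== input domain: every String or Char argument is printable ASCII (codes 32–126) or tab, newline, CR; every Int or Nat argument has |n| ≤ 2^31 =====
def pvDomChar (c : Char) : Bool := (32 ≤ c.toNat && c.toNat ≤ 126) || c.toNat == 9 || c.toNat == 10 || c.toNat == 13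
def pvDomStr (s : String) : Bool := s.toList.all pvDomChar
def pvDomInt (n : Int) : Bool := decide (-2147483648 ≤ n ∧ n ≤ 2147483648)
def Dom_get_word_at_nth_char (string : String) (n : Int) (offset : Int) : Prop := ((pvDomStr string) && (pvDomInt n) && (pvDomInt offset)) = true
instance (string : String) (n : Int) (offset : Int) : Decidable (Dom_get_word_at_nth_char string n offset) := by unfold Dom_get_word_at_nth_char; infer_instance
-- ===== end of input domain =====

-- B replaces A's linear position-accumulating scan by a precomputed prefix-end table
-- plus a bisect_left binary search over it (objective: alternative decomposition).

-- ===== PORT A =====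
-- the for-loop over enumerate(words) with accumulator `start`; a `none` in the found
-- branch encodes Python's IndexError (excluded by Pre_)
def pvA_loop (allWords : List String) (n : Int) (offset : Int) :
    List (Int × String) → Int → Option String
  | [], _ => none
  | (i, word) :: rest, start =>
      let e := start + PySem.Str.len word
      if n ≤ e then
        PySem.List.pyGet? allWords (min (i + offset) (PySem.List.len allWords - 1))
      else pvA_loop allWords n offset rest (e + 1)

def get_word_at_nth_char (string : String) (n : Int) (offset : Int) : Option String :=
  let words := PySem.Str.split₀ string
  pvA_loop words n offset (PySem.List.enumerate words 0) 0

-- ===== PORT B =====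
-- ends[i] = cumulative single-space end position of word i (the loop `acc += len+1; append acc-1`)
def pvB_ends : List String → Int → List Int
  | [], _ => []
  | w :: ws, acc =>
      let acc' := acc + PySem.Str.len w + 1
      (acc' - 1) :: pvB_ends ws acc'

-- bisect.bisect_left(a, x) (lo, hi as in the stdlib)
def pvBisect (a : List Int) (x : Int) (lo hi : Nat) : Nat :=
  if lo < hi then
    let mid := (lo + hi) / 2
    if a.getD mid 0 < x then pvBisect a x (mid + 1) hi else pvBisect a x lo mid
  else lo
termination_by hi - lo
decreasing_by all_goals omega

def get_word_at_nth_char_alt (string : String) (n : Int) (offset : Int) : Option String :=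
  let words := PySem.Str.split₀ string
  let ends := pvB_ends words 0
  let idx := pvBisect ends n 0 ends.length
  if idx = words.length then none
  else PySem.List.pyGet? words (min ((idx : Int) + offset) (PySem.List.len words - 1))

-- ===== PRECONDITION & SPEC =====
-- Pre_ excludes exactly the inputs on which Python A raises IndexError: the first word
-- whose reconstructed end position reaches n has index i with i + offset < -len(words).
def Pre_get_word_at_nth_char (string : String) (n : Int) (offset : Int) : Prop :=
  ∀ i : Nat, i < (PySem.Str.split₀ string).length →
    n ≤ (((PySem.Str.split₀ string).take (i + 1)).map PySem.Str.len).sum + (i : Int) →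
    -((PySem.Str.split₀ string).length : Int) ≤ (i : Int) + offset
instance (string : String) (n : Int) (offset : Int) : Decidable (Pre_get_word_at_nth_char string n offset) := by unfold Pre_get_word_at_nth_char; infer_instance

def pvWitness_get_word_at_nth_char : String × Int × Int := ("ab cd ef", 4, 1)

def Spec_get_word_at_nth_char (string : String) (n : Int) (offset : Int) (out : Option String) : Prop := out = get_word_at_nth_char_alt string n offset
instance (string : String) (n : Int) (offset : Int) (out : Option String) : Decidable (Spec_get_word_at_nth_char string n offset out) := by unfold Spec_get_word_at_nth_char; infer_instance

-- ===== CLAIM (what is proved, stated in full; the proofs are below) =====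
def Claim_equal_get_word_at_nth_char : Prop := ∀ (string : String) (n : Int) (offset : Int), Dom_get_word_at_nth_char string n offset → Pre_get_word_at_nth_char string n offset → Spec_get_word_at_nth_char string n offset (get_word_at_nth_char string n offset)

-- ===== LEMMAS AND PROOFS =====

-- proof-side: index of the first entry e of the list with x ≤ e
def pvFirstIdx (a : List Int) (x : Int) : Option Nat :=
  match a with
  | [] => none
  | e :: es => if x ≤ e then some 0 else (pvFirstIdx es x).map (· + 1)

theorem pvB_ends_length (ws : List String) (acc : Int) :
    (pvB_ends ws acc).length = ws.length := by
  induction ws generalizing acc with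
  | nil => rfl
  | cons w ws ih => simp [pvB_ends, ih]

theorem pvA_loop_eq_firstIdx (allW : List String) (n off : Int)
    (ws : List String) (i : Int) (start : Int) :
    pvA_loop allW n off (PySem.List.enumerate ws i) start =
      (match pvFirstIdx (pvB_ends ws start) n with
       | some k => PySem.List.pyGet? allW (min ((i + k) + off) (PySem.List.len allW - 1))
       | none => none) := by
  induction ws generalizing i start with
  | nil => simp [PySem.List.enumerate_nil, pvA_loop, pvB_ends, pvFirstIdx]
  | cons w ws ih =>
    rw [PySem.List.enumerate_cons]
    show (if n ≤ start + PySem.Str.len w then _ else _) = _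
    simp only [pvB_ends, pvFirstIdx, PySem.Str.len_eq, String.length_toList]
    have he : start + (w.length : Int) + 1 - 1 = start + (w.length : Int) := by ring
    rw [he]
    by_cases h : n ≤ start + (w.length : Int)
    · simp [h]
    · simp only [h, if_false]
      rw [ih (i + 1)]
      cases hfi : pvFirstIdx (pvB_ends ws (start + (w.length : Int) + 1)) n with
      | none => simp
      | some k =>
        simp only [Option.map_some]
        have : (i + 1 + (k : Int)) = i + ((k : Int) + 1) := by ring
        rw [this]
        push_cast
        ring_nf

-- the bisect invariant
theorem pvBisect_spec (a : List Int) (x : Int)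
    (mono : ∀ i j : Nat, i ≤ j → j < a.length → a.getD i 0 ≤ a.getD j 0) :
    ∀ (fuel lo hi : Nat), hi - lo ≤ fuel → lo ≤ hi → hi ≤ a.length →
    (∀ i, i < lo → a.getD i 0 < x) → (∀ i, hi ≤ i → i < a.length → x ≤ a.getD i 0) →
    (∀ i, i < pvBisect a x lo hi → a.getD i 0 < x) ∧
    (∀ i, pvBisect a x lo hi ≤ i → i < a.length → x ≤ a.getD i 0) ∧
    pvBisect a x lo hi ≤ a.length := by
  intro fuel
  induction fuel with
  | zero =>
    intro lo hi hfuel hlohi hhi hbelow habove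
    have : lo = hi := by omega
    subst this
    rw [pvBisect]; simp only [lt_irrefl, if_false]
    exact ⟨hbelow, habove, hhi⟩
  | succ fuel ih =>
    intro lo hi hfuel hlohi hhi hbelow habove
    rw [pvBisect]
    by_cases h : lo < hi
    · simp only [h, if_true]
      by_cases hm : a.getD ((lo + hi) / 2) 0 < x
      · simp only [hm, if_true]
        exact ih ((lo + hi) / 2 + 1) hi (by omega) (by omega) hhi
          (fun i hi' => lt_of_le_of_lt (mono i ((lo + hi) / 2) (by omega) (by omega)) hm)
          habove
      · simp only [hm, if_false]
        exact ih lo ((lo + hi) / 2) (by omega) (by omega) (by omega) hbelow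
          (fun i hi1 hi2 => le_trans (not_lt.mp hm) (mono ((lo + hi) / 2) i hi1 hi2))
    · simp only [h, if_false]
      have : lo = hi := by omega
      subst this
      exact ⟨hbelow, habove, hhi⟩

theorem pvFirstIdx_of_inv (a : List Int) (x : Int) (r : Nat)
    (hr : r ≤ a.length)
    (hbelow : ∀ i, i < r → a.getD i 0 < x)
    (habove : ∀ i, r ≤ i → i < a.length → x ≤ a.getD i 0) :
    pvFirstIdx a x = if r = a.length then none else some r := by
  induction a generalizing r with
  | nil =>
    simp at hr; subst hr; simp [pvFirstIdx]
  | cons e es ih =>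
    simp only [pvFirstIdx]
    cases r with
    | zero =>
      have : x ≤ e := habove 0 (by omega) (by simp)
      simp [this, List.length_cons]
    | succ r' =>
      have he : e < x := by simpa using hbelow 0 (by omega)
      rw [if_neg (by omega)]
      have := ih r' (by simpa using hr)
        (fun i hi => by simpa using hbelow (i + 1) (by omega))
        (fun i h1 h2 => by simpa using habove (i + 1) (by omega) (by simpa using h2))
      rw [this]
      by_cases hcase : r' = es.length
      · simp [hcase]
      · simp [hcase, List.length_cons]

theorem pvB_ends_mono (ws : List String) (acc : Int) :
    ∀ i j : Nat, i ≤ j → j < (pvB_ends ws acc).length →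
      (pvB_ends ws acc).getD i 0 ≤ (pvB_ends ws acc).getD j 0 := by
  induction ws generalizing acc with
  | nil => intro i j _ hj; simp [pvB_ends] at hj
  | cons w ws ih =>
    intro i j hij hj
    have hlen : 0 ≤ PySem.Str.len w := by
      simp [PySem.Str.len_eq]
    simp only [pvB_ends, List.length_cons] at hj ⊢
    have he : acc + PySem.Str.len w + 1 - 1 = acc + PySem.Str.len w := by ring
    cases i with
    | zero =>
      cases j with
      | zero => simp
      | succ j' =>
        simp only [List.getD_cons_zero, List.getD_cons_succ, he]
        -- head ≤ every later entry: later entries start at acc + len w + 1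
        have hfirst : ∀ (ws' : List String) (acc' : Int) (k : Nat),
            k < (pvB_ends ws' acc').length → acc' - 1 ≤ (pvB_ends ws' acc').getD k 0 := by
          intro ws'
          induction ws' with
          | nil => intro acc' k hk; simp [pvB_ends] at hk
          | cons v vs ihv =>
            intro acc' k hk
            have hv : 0 ≤ PySem.Str.len v := by simp [PySem.Str.len_eq]
            cases k with
            | zero => simp [pvB_ends]; omega
            | succ k' =>
              simp only [pvB_ends, List.getD_cons_succ]
              have := ihv (acc' + PySem.Str.len v + 1) k'
                (by simpa [pvB_ends] using hk)
              omega
        have := hfirst ws (acc + PySem.Str.len w + 1) j' (by omega)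
        omega
    | succ i' =>
      cases j with
      | zero => omega
      | succ j' =>
        simp only [List.getD_cons_succ]
        exact ih (acc + PySem.Str.len w + 1) i' j' (by omega) (by omega)

theorem get_word_at_nth_char_spec : Claim_equal_get_word_at_nth_char := by
  intro s n off _ _
  unfold Spec_get_word_at_nth_char get_word_at_nth_char get_word_at_nth_char_alt
  set words := PySem.Str.split₀ s with hw
  set ends := pvB_ends words 0 with hends
  have hlen : ends.length = words.length := pvB_ends_length words 0
  have hspec := pvBisect_spec ends n (pvB_ends_mono words 0) ends.length 0 ends.length
    (by omega) (by omega) (le_refl _) (by omega) (fun i h1 h2 => by omega)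
  obtain ⟨hbelow, habove, hle⟩ := hspec
  set idx := pvBisect ends n 0 ends.length with hidx
  have hfi : pvFirstIdx ends n = if idx = ends.length then none else some idx :=
    pvFirstIdx_of_inv ends n idx hle hbelow habove
  rw [pvA_loop_eq_firstIdx words n off words 0 0]
  rw [← hends, hfi]
  by_cases hcase : idx = words.length
  · rw [if_pos (by omega), if_pos hcase]
  · rw [if_neg (by omega), if_neg hcase]
    simp only [zero_add]
    rfl
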